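-- pv_equiv track=rewrite | github.com/Darukity/tdd-exam | holdem.py | _find_three_of_a_kind_cards
-- ===== SOURCE A (Python) =====
-- from typing import Sequence
--
-- Card = str
--
-- RANK_TO_VALUE = {
--     "2": 2,
--     "3": 3,
--     "4": 4,
--     "5": 5,
--     "6": 6,
--     "7": 7,
--     "8": 8,
--     "9": 9,
--     "T": 10,
--     "J": 11,
--     "Q": 12,
--     "K": 13,
--     "A": 14,
-- }
--
-- def _card_rank_value(card: Card) -> int:
--     return RANK_TO_VALUE[card[0]]
--
-- def _as_chosen5(cards: Sequence[Card]) -> tuple[Card, Card, Card, Card, Card]: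
--     return (cards[0], cards[1], cards[2], cards[3], cards[4])
--
-- def _group_cards_by_rank(cards: Sequence[Card]) -> dict[int, list[Card]]:
--     cards_by_rank: dict[int, list[Card]] = {}
--     for card in cards:
--         rank = _card_rank_value(card)
--         cards_by_rank.setdefault(rank, []).append(card)
--     return cards_by_rank
--
-- def _find_three_of_a_kind_cards(cards: Sequence[Card]) -> tuple[Card, Card, Card, Card, Card] | None:
--     cards_by_rank = _group_cards_by_rank(cards)
--
--     trip_ranks = sorted([rank for rank, rank_cards in cards_by_rank.items() if len(rank_cards) >= 3], reverse=True)
--     if not trip_ranks: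
--         return None
--
--     trip_rank = trip_ranks[0]
--     trip_cards = cards_by_rank[trip_rank][:3]
--     kickers = sorted(
--         [card for card in cards if _card_rank_value(card) != trip_rank],
--         key=_card_rank_value,
--         reverse=True,
--     )
--
--     return _as_chosen5([trip_cards[0], trip_cards[1], trip_cards[2], kickers[0], kickers[1]])
-- ===== SOURCE B (Python) =====
-- from typing import Sequence
--
-- Card = str
--
-- RANK_TO_VALUE = {
--     "2": 2, "3": 3, "4": 4, "5": 5, "6": 6, "7": 7, "8": 8, "9": 9,
--     "T": 10, "J": 11, "Q": 12, "K": 13, "A": 14,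
-- }
--
-- def _card_rank_value(card: Card) -> int:
--     return RANK_TO_VALUE[card[0]]
--
-- def _as_chosen5(cards: Sequence[Card]) -> tuple[Card, Card, Card, Card, Card]:
--     return (cards[0], cards[1], cards[2], cards[3], cards[4])
--
-- def _scan_runs(prefix: list, rest: list):
--     # rest is sorted by rank descending, so each rank forms one contiguous run.
--     if not rest:
--         return None
--     r = _card_rank_value(rest[0])
--     k = 0
--     while k < len(rest) and _card_rank_value(rest[k]) == r:
--         k += 1
--     run, tail = rest[:k], rest[k:]
--     if len(run) >= 3:
--         kickers = prefix + tail
--         return _as_chosen5([run[0], run[1], run[2], kickers[0], kickers[1]])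
--     return _scan_runs(prefix + run, tail)
--
-- def _find_three_of_a_kind_cards(cards: Sequence[Card]) -> tuple[Card, Card, Card, Card, Card] | None:
--     return _scan_runs([], sorted(cards, key=_card_rank_value, reverse=True))
-- ===== Notes on version B (the rewrite author's own statement) =====
-- stated objective: alternative
-- what changed: Replaces the rank-grouping dict plus separate trip-rank sort and kicker sort with a single stable descending sort followed by a run scan: the first run of length >= 3 gives the trips and the surrounding prefix/suffix give the kickers already in order.
import Mathlib
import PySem

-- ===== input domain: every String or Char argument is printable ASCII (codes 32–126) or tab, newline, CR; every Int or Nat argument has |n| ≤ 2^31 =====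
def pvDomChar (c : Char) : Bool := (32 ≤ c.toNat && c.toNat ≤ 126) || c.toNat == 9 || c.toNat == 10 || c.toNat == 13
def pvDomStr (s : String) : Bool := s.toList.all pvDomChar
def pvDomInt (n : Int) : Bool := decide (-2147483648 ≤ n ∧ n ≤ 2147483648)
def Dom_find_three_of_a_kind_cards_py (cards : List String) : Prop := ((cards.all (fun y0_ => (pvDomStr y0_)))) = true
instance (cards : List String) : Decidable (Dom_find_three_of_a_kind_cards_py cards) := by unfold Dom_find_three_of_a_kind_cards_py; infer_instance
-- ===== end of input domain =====

-- B replaces A's rank-grouping dict + two sorts by ONE stable descending sort followed by a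
-- scan of its equal-rank runs (alternative decomposition, same asymptotic cost).

-- ===== PORT A =====
-- module constant RANK_TO_VALUE
def RANK_TO_VALUE : PySem.Dict Char Int := PySem.Dict.ofList
  [('2',2),('3',3),('4',4),('5',5),('6',6),('7',7),('8',8),('9',9),('T',10),('J',11),('Q',12),('K',13),('A',14)]

-- module helper _card_rank_value, shared by both Pythons. card[0] raises IndexError on "" and
-- the dict lookup raises KeyError on a non-rank character: both are excluded by Pre_, so the
-- defaults used here are unreachable on admitted inputs.
def cardRankValue (card : String) : Int := RANK_TO_VALUE.getD (card.toList.headD ' ') 0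

-- _find_three_of_a_kind_cards, literal: group by rank (setdefault+append = modify), pick the
-- highest rank with ≥ 3 cards, sort the other cards by rank descending. kickers[0]/kickers[1]
-- raise IndexError when fewer than two kickers exist: excluded by Pre_, defaults unreachable.
def find_three_of_a_kind_cards_py (cards : List String) : Option (String × String × String × String × String) :=
  let cards_by_rank := cards.foldl (fun d card => d.modify (cardRankValue card) [] (fun l => l ++ [card])) PySem.Dict.empty
  let trip_ranks := PySem.List.sorted (cards_by_rank.items.filterMap (fun p => if 3 ≤ p.2.length then some p.1 else none)) (fun r => r) true
  match trip_ranks with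
  | [] => none
  | trip_rank :: _ =>
    let trip_cards := PySem.List.slice (cards_by_rank.getD trip_rank []) none (some 3)
    let kickers := PySem.List.sorted (cards.filter (fun card => cardRankValue card != trip_rank)) cardRankValue true
    some (PySem.List.pyGetD trip_cards 0 "", PySem.List.pyGetD trip_cards 1 "", PySem.List.pyGetD trip_cards 2 "",
          PySem.List.pyGetD kickers 0 "", PySem.List.pyGetD kickers 1 "")

-- ===== PORT B =====
-- _scan_runs: rest is sorted by rank descending, so each rank is one contiguous run
-- (the inner while loop collecting the run is takeWhile/dropWhile). kickers[0]/kickers[1]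
-- raise IndexError when fewer than two kickers exist: excluded by Pre_, defaults unreachable.
def scanRuns (pre rest : List String) : Option (String × String × String × String × String) :=
  match rest with
  | [] => none
  | c :: cs =>
    let r := cardRankValue c
    let run := (c :: cs).takeWhile (fun d => cardRankValue d == r)
    let tail := (c :: cs).dropWhile (fun d => cardRankValue d == r)
    if 3 ≤ run.length then
      let kickers := pre ++ tail
      some (PySem.List.pyGetD run 0 "", PySem.List.pyGetD run 1 "", PySem.List.pyGetD run 2 "",
            PySem.List.pyGetD kickers 0 "", PySem.List.pyGetD kickers 1 "")
    else scanRuns (pre ++ run) tail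
termination_by rest.length
decreasing_by
  simp only [List.dropWhile_cons, beq_self_eq_true, if_true]
  have := List.length_dropWhile_le (fun d => cardRankValue d == cardRankValue c) cs
  simp only [List.length_cons]
  omega

-- _find_three_of_a_kind_cards (B): one stable descending sort, then the run scan
def find_three_of_a_kind_cards_py_alt (cards : List String) : Option (String × String × String × String × String) :=
  scanRuns [] (PySem.List.sorted cards cardRankValue true)

-- ===== PRECONDITION & SPEC =====
-- Pre_ excludes exactly the inputs where the Python raises: a card that is "" (IndexError) or whose
-- first character is not a rank (KeyError), and hands whose best three-of-a-kind leaves fewer than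
-- two cards of other ranks (IndexError on kickers[1]). Both Pythons raise on all of these.
def Pre_find_three_of_a_kind_cards_py (cards : List String) : Prop :=
  (∀ card ∈ cards, card.toList ≠ [] ∧ RANK_TO_VALUE.contains (card.toList.headD ' ') = true) ∧
  (∀ c ∈ cards, (3 ≤ (cards.filter (fun d => cardRankValue d == cardRankValue c)).length ∧
      ∀ c' ∈ cards, 3 ≤ (cards.filter (fun d => cardRankValue d == cardRankValue c')).length → cardRankValue c' ≤ cardRankValue c) →
    2 ≤ (cards.filter (fun d => cardRankValue d != cardRankValue c)).length)
instance (cards : List String) : Decidable (Pre_find_three_of_a_kind_cards_py cards) := by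
  unfold Pre_find_three_of_a_kind_cards_py; infer_instance

def pvWitness_find_three_of_a_kind_cards_py : List String := ["2h", "2d", "2c", "Kh", "Qs"]

def Spec_find_three_of_a_kind_cards_py (cards : List String) (out : Option (String × String × String × String × String)) : Prop := out = find_three_of_a_kind_cards_py_alt cards
instance (cards : List String) (out : Option (String × String × String × String × String)) : Decidable (Spec_find_three_of_a_kind_cards_py cards out) := by unfold Spec_find_three_of_a_kind_cards_py; infer_instance

-- ===== CLAIM (what is proved, stated in full; the proofs are below) =====
def Claim_equal_find_three_of_a_kind_cards_py : Prop := ∀ (cards : List String), Dom_find_three_of_a_kind_cards_py cards → Pre_find_three_of_a_kind_cards_py cards → Spec_find_three_of_a_kind_cards_py cards (find_three_of_a_kind_cards_py cards)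

-- ===== LEMMAS AND PROOFS =====

theorem insertBy_of_forall_lt {α : Type} (rv : α → Int) (x : α) (zs : List α)
    (h : ∀ z ∈ zs, rv z < rv x) :
    PySem.List.insertBy (fun a b => decide (rv b < rv a)) x zs = x :: zs := by
  cases zs with
  | nil => rfl
  | cons z zs =>
    simp only [PySem.List.insertBy]
    rw [if_pos]
    simp only [decide_eq_true_eq]
    exact h z (List.mem_cons_self ..)

theorem filter_insertBy {α : Type} (rv : α → Int) (p : α → Bool) (x : α) (ys : List α)
    (h : ys.Pairwise (fun a b => rv b ≤ rv a)) :
    (PySem.List.insertBy (fun a b => decide (rv b < rv a)) x ys).filter p =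
      if p x then PySem.List.insertBy (fun a b => decide (rv b < rv a)) x (ys.filter p) else ys.filter p := by
  induction ys with
  | nil =>
    simp only [PySem.List.insertBy, List.filter]
    split <;> simp_all
  | cons y ys ih =>
    rw [List.pairwise_cons] at h
    obtain ⟨hy, h'⟩ := h
    simp only [PySem.List.insertBy]
    by_cases hb : rv y < rv x
    · rw [if_pos (by simpa using hb)]
      have hall : ∀ z ∈ (y :: ys).filter p, rv z < rv x := by
        intro z hz
        have hz' := List.mem_of_mem_filter hz
        rcases List.mem_cons.mp hz' with h1 | h1
        · exact h1 ▸ hb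
        · exact lt_of_le_of_lt (hy z h1) hb
      rw [insertBy_of_forall_lt rv x _ hall]
      by_cases hp : p x
      · simp [hp, List.filter_cons]
      · simp [hp, List.filter_cons]
    · rw [if_neg (by simpa using hb)]
      have ih' := ih h'
      by_cases hp : p x
      · simp only [hp, if_true] at ih' ⊢
        by_cases hpy : p y
        · rw [List.filter_cons_of_pos hpy, List.filter_cons_of_pos hpy]
          simp only [PySem.List.insertBy]
          rw [if_neg (by simpa using hb)]
          rw [ih']
        · rw [List.filter_cons_of_neg hpy, List.filter_cons_of_neg hpy, ih']
      · simp only [hp, Bool.false_eq_true, if_false] at ih' ⊢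
        by_cases hpy : p y
        · rw [List.filter_cons_of_pos hpy, List.filter_cons_of_pos hpy, ih']
        · rw [List.filter_cons_of_neg hpy, List.filter_cons_of_neg hpy, ih']

theorem filter_sorted_rev {α : Type} (rv : α → Int) (p : α → Bool) (xs : List α) :
    (PySem.List.sorted xs rv true).filter p = PySem.List.sorted (xs.filter p) rv true := by
  induction xs using List.reverseRecOn with
  | nil => rfl
  | append_singleton xs x ih =>
    rw [PySem.List.sorted_rev_eq_foldl_insertBy, List.foldl_append, List.foldl_cons, List.foldl_nil,
        ← PySem.List.sorted_rev_eq_foldl_insertBy,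
        filter_insertBy rv p x _ (PySem.List.sorted_pairwise_rev xs rv),
        List.filter_append]
    by_cases hp : p x
    · rw [if_pos hp, ih]
      simp only [List.filter_cons_of_pos hp, List.filter_nil]
      rw [PySem.List.sorted_rev_eq_foldl_insertBy (xs.filter p ++ [x]), List.foldl_append,
          List.foldl_cons, List.foldl_nil, ← PySem.List.sorted_rev_eq_foldl_insertBy]
    · rw [if_neg hp, ih]
      simp [List.filter_cons_of_neg hp]

theorem run_split {α : Type} (rv : α → Int) (r : Int) (l : List α)
    (hl : l.Pairwise (fun a b => rv b ≤ rv a)) (hr : ∀ x ∈ l, rv x ≤ r) :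
    l.takeWhile (fun d => rv d == r) = l.filter (fun d => rv d == r) ∧
    l.dropWhile (fun d => rv d == r) = l.filter (fun d => rv d != r) := by
  induction l with
  | nil => simp
  | cons c cs ih =>
    rw [List.pairwise_cons] at hl
    obtain ⟨hc, hl'⟩ := hl
    have hcr : rv c ≤ r := hr c (List.mem_cons_self ..)
    by_cases h : rv c = r
    · have hb : (rv c == r) = true := by simp [h]
      have ⟨ih1, ih2⟩ := ih hl' (fun x hx => le_trans (hc x hx) hcr)
      refine ⟨?_, ?_⟩
      · rw [List.takeWhile_cons_of_pos (p := fun d => rv d == r) hb,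
            List.filter_cons_of_pos (p := fun d => rv d == r) hb, ih1]
      · rw [List.dropWhile_cons_of_pos (p := fun d => rv d == r) hb, ih2,
            List.filter_cons_of_neg (p := fun d => rv d != r) (by simp [h])]
    · have hlt : rv c < r := lt_of_le_of_ne hcr h
      have hnone : ∀ x ∈ c :: cs, (rv x == r) = false := by
        intro x hx
        rcases List.mem_cons.mp hx with h1 | h1
        · simp [h1, h]
        · have := lt_of_le_of_lt (hc x h1) hlt
          simp [ne_of_lt this]
      refine ⟨?_, ?_⟩
      · rw [List.takeWhile_cons_of_neg (p := fun d => rv d == r) (by simp [h])]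
        rw [List.filter_eq_nil_iff.mpr (by intro a ha; simp [hnone a ha])]
      · rw [List.dropWhile_cons_of_neg (p := fun d => rv d == r) (by simp [h])]
        rw [List.filter_eq_self.mpr (by intro a ha; simpa using hnone a ha)]

theorem cnt_tail {α : Type} (rv : α → Int) (l : List α) (r t : Int) (h : t ≠ r) :
    (l.filter (fun d => rv d != r)).filter (fun d => rv d == t) = l.filter (fun d => rv d == t) := by
  rw [List.filter_filter]
  apply List.filter_congr
  intro d _
  by_cases hd : rv d = t
  · simp [hd, h]
  · simp [hd]

theorem scanRuns_none : ∀ (n : Nat) (rest pre : List String), rest.length ≤ n →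
    rest.Pairwise (fun a b => cardRankValue b ≤ cardRankValue a) →
    (∀ b ∈ rest, (rest.filter (fun d => cardRankValue d == cardRankValue b)).length < 3) →
    scanRuns pre rest = none := by
  intro n
  induction n with
  | zero =>
    intro rest pre hlen _ _
    rw [List.length_eq_zero_iff.mp (Nat.le_zero.mp hlen), scanRuns.eq_def]
  | succ n ih =>
    intro rest pre hlen hpw hcnt
    cases rest with
    | nil => rw [scanRuns.eq_def]
    | cons c cs =>
      obtain ⟨hc, hpw'⟩ := List.pairwise_cons.mp hpw
      have hr0 : ∀ x ∈ c :: cs, cardRankValue x ≤ cardRankValue c := by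
        intro x hx
        rcases List.mem_cons.mp hx with h | h
        · exact h ▸ le_refl _
        · exact hc x h
      obtain ⟨htw, hdw⟩ := run_split cardRankValue (cardRankValue c) (c :: cs) hpw hr0
      rw [scanRuns.eq_def]
      simp only [htw, hdw]
      rw [if_neg (by exact Nat.not_le.mpr (hcnt c (List.mem_cons_self ..)))]
      apply ih
      · have h1 : ((c :: cs).filter (fun d => cardRankValue d != cardRankValue c)).length ≤ cs.length := by
          rw [List.filter_cons_of_neg (by simp)]
          exact List.length_filter_le _ _
        simp only [List.length_cons] at hlen
        omega
      · exact hpw.filter _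
      · intro b hb
        have hne : cardRankValue b ≠ cardRankValue c := by
          have := (List.mem_filter.mp hb).2
          simpa using this
        rw [cnt_tail cardRankValue _ _ _ hne]
        exact hcnt b (List.mem_of_mem_filter hb)

theorem scanRuns_found : ∀ (n : Nat) (rest pre : List String) (t : Int), rest.length ≤ n →
    rest.Pairwise (fun a b => cardRankValue b ≤ cardRankValue a) →
    3 ≤ (rest.filter (fun d => cardRankValue d == t)).length →
    (∀ b ∈ rest, 3 ≤ (rest.filter (fun d => cardRankValue d == cardRankValue b)).length → cardRankValue b ≤ t) →
    scanRuns pre rest = some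
      (PySem.List.pyGetD (rest.filter (fun d => cardRankValue d == t)) 0 "",
       PySem.List.pyGetD (rest.filter (fun d => cardRankValue d == t)) 1 "",
       PySem.List.pyGetD (rest.filter (fun d => cardRankValue d == t)) 2 "",
       PySem.List.pyGetD (pre ++ rest.filter (fun d => cardRankValue d != t)) 0 "",
       PySem.List.pyGetD (pre ++ rest.filter (fun d => cardRankValue d != t)) 1 "") := by
  intro n
  induction n with
  | zero =>
    intro rest pre t hlen _ hcnt3 _
    rw [List.length_eq_zero_iff.mp (Nat.le_zero.mp hlen)] at hcnt3
    simp at hcnt3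
  | succ n ih =>
    intro rest pre t hlen hpw hcnt3 hmax
    cases rest with
    | nil => simp at hcnt3
    | cons c cs =>
      obtain ⟨hc, hpw'⟩ := List.pairwise_cons.mp hpw
      have hr0 : ∀ x ∈ c :: cs, cardRankValue x ≤ cardRankValue c := by
        intro x hx
        rcases List.mem_cons.mp hx with h | h
        · exact h ▸ le_refl _
        · exact hc x h
      obtain ⟨htw, hdw⟩ := run_split cardRankValue (cardRankValue c) (c :: cs) hpw hr0
      -- t is a rank present in the list, so t ≤ rank of the head
      have htc : t ≤ cardRankValue c := by
        have hne : (c :: cs).filter (fun d => cardRankValue d == t) ≠ [] := by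
          intro h
          rw [h] at hcnt3
          simp at hcnt3
        obtain ⟨b, hb⟩ := List.exists_mem_of_ne_nil _ hne
        have hb1 := List.mem_of_mem_filter hb
        have hb2 : cardRankValue b = t := by
          have := (List.mem_filter.mp hb).2
          simpa using this
        exact hb2 ▸ hr0 b hb1
      rw [scanRuns.eq_def]
      simp only [htw, hdw]
      by_cases hge : 3 ≤ ((c :: cs).filter (fun d => cardRankValue d == cardRankValue c)).length
      · have ht : cardRankValue c = t :=
          le_antisymm (hmax c (List.mem_cons_self ..) hge) htc
        rw [if_pos hge]
        subst ht
        rfl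
      · rw [if_neg hge]
        have hrt : t ≠ cardRankValue c := by
          intro h
          rw [h] at hcnt3
          exact hge hcnt3
        have h1 : ((c :: cs).filter (fun d => cardRankValue d != cardRankValue c)).filter (fun d => cardRankValue d == t)
            = (c :: cs).filter (fun d => cardRankValue d == t) := cnt_tail cardRankValue _ _ _ hrt
        have h2 : (c :: cs).filter (fun d => cardRankValue d != t)
            = (c :: cs).filter (fun d => cardRankValue d == cardRankValue c)
              ++ ((c :: cs).filter (fun d => cardRankValue d != cardRankValue c)).filter (fun d => cardRankValue d != t) := by
          conv_lhs => rw [← List.takeWhile_append_dropWhile (p := fun d => cardRankValue d == cardRankValue c) (l := c :: cs)]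
          rw [List.filter_append, htw, hdw]
          congr 1
          apply List.filter_eq_self.mpr
          intro a ha
          have : cardRankValue a = cardRankValue c := by
            have := (List.mem_filter.mp ha).2
            simpa using this
          simp [this, Ne.symm hrt]
        have ihap := ih ((c :: cs).filter (fun d => cardRankValue d != cardRankValue c))
          (pre ++ (c :: cs).filter (fun d => cardRankValue d == cardRankValue c)) t
          (by
            have h3 : ((c :: cs).filter (fun d => cardRankValue d != cardRankValue c)).length ≤ cs.length := by
              rw [List.filter_cons_of_neg (by simp)]
              exact List.length_filter_le _ _
            simp only [List.length_cons] at hlen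
            omega)
          (hpw.filter _)
          (by rw [h1]; exact hcnt3)
          (by
            intro b hb
            have hne : cardRankValue b ≠ cardRankValue c := by
              have := (List.mem_filter.mp hb).2
              simpa using this
            rw [cnt_tail cardRankValue _ _ _ hne]
            exact hmax b (List.mem_of_mem_filter hb))
        rw [ihap, h1, h2, List.append_assoc]

theorem groupDict_getD (cards : List String) (r : Int) :
    (cards.foldl (fun d card => d.modify (cardRankValue card) [] (fun l => l ++ [card])) PySem.Dict.empty).getD r []
      = cards.filter (fun c => cardRankValue c == r) := by
  have hmap : cards.foldl (fun d card => d.modify (cardRankValue card) [] (fun l => l ++ [card])) PySem.Dict.empty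
      = (cards.map (fun c => (cardRankValue c, c))).foldl (fun d p => d.modify p.1 [] (fun l => l ++ [p.2])) PySem.Dict.empty := by
    rw [List.foldl_map]
  rw [hmap, PySem.Dict.getD_foldl_modify_append]
  rw [List.filter_map]
  simp only [List.map_map]
  rw [PySem.Dict.getD_empty, List.nil_append]
  simp [Function.comp_def]

theorem groupDict_keys (cards : List String) :
    (cards.foldl (fun d card => d.modify (cardRankValue card) [] (fun l => l ++ [card])) PySem.Dict.empty).keys
      = PySem.Set.ofList (cards.map cardRankValue) := by
  rw [PySem.Dict.keys_foldl_modify_key cards cardRankValue [] (fun d x l => l ++ [x]) PySem.Dict.empty]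
  rw [PySem.Dict.keys_empty, PySem.Set.update_nil_left]

theorem groupDict_nodup (cards : List String) :
    (cards.foldl (fun d card => d.modify (cardRankValue card) [] (fun l => l ++ [card])) PySem.Dict.empty).keys.Nodup := by
  exact PySem.Dict.nodup_keys_foldl_modify_key cards cardRankValue [] (fun d x l => l ++ [x]) PySem.Dict.empty
    (by rw [PySem.Dict.keys_empty]; exact List.nodup_nil)

theorem mem_tripRanks (cards : List String) (r : Int) :
    r ∈ (cards.foldl (fun d card => d.modify (cardRankValue card) [] (fun l => l ++ [card])) PySem.Dict.empty).items.filterMap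
          (fun p => if 3 ≤ p.2.length then some p.1 else none)
      ↔ r ∈ cards.map cardRankValue ∧ 3 ≤ (cards.filter (fun c => cardRankValue c == r)).length := by
  rw [PySem.Dict.items_eq_map_keys _ (groupDict_nodup cards) []]
  rw [List.filterMap_map]
  constructor
  · intro h
    obtain ⟨k, hk, hsome⟩ := List.mem_filterMap.mp h
    simp only [Function.comp] at hsome
    split at hsome
    · rename_i hlen
      cases hsome
      rw [groupDict_getD] at hlen
      refine ⟨?_, hlen⟩
      have := groupDict_keys cards ▸ hk
      exact (PySem.Set.mem_ofList _ _).mp this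
    · cases hsome
  · intro ⟨hmem, hlen⟩
    apply List.mem_filterMap.mpr
    refine ⟨r, ?_, ?_⟩
    · rw [groupDict_keys]
      exact (PySem.Set.mem_ofList _ _).mpr hmem
    · simp only [Function.comp]
      rw [groupDict_getD, if_pos hlen]

theorem getD_take3 {α : Type} (l : List α) (d : α) (i : Nat) (h : i < 3) :
    (l.take 3).getD i d = l.getD i d := by
  simp [List.getD_eq_getElem?_getD, h]


-- ===== VERDICT (by name: the statement is the Claim_ definition above) =====
theorem find_three_of_a_kind_cards_py_spec : Claim_equal_find_three_of_a_kind_cards_py := by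
  intro cards _ hpre
  show find_three_of_a_kind_cards_py cards = find_three_of_a_kind_cards_py_alt cards
  have hB : find_three_of_a_kind_cards_py_alt cards
      = scanRuns [] (PySem.List.sorted cards cardRankValue true) := rfl
  rw [hB]
  clear hpre
  have hA : find_three_of_a_kind_cards_py cards
      = match PySem.List.sorted
          ((cards.foldl (fun d card => d.modify (cardRankValue card) [] (fun l => l ++ [card])) PySem.Dict.empty).items.filterMap
            (fun p => if 3 ≤ p.2.length then some p.1 else none)) (fun r => r) true with
        | [] => none
        | trip_rank :: _ =>
          some (PySem.List.pyGetD (PySem.List.slice ((cards.foldl (fun d card => d.modify (cardRankValue card) [] (fun l => l ++ [card])) PySem.Dict.empty).getD trip_rank []) none (some 3)) 0 "",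
                PySem.List.pyGetD (PySem.List.slice ((cards.foldl (fun d card => d.modify (cardRankValue card) [] (fun l => l ++ [card])) PySem.Dict.empty).getD trip_rank []) none (some 3)) 1 "",
                PySem.List.pyGetD (PySem.List.slice ((cards.foldl (fun d card => d.modify (cardRankValue card) [] (fun l => l ++ [card])) PySem.Dict.empty).getD trip_rank []) none (some 3)) 2 "",
                PySem.List.pyGetD (PySem.List.sorted (cards.filter (fun card => cardRankValue card != trip_rank)) cardRankValue true) 0 "",
                PySem.List.pyGetD (PySem.List.sorted (cards.filter (fun card => cardRankValue card != trip_rank)) cardRankValue true) 1 "") := rfl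
  rw [hA]
  -- counts are unchanged by sorting
  have hcntS : ∀ p : String → Bool,
      ((PySem.List.sorted cards cardRankValue true).filter p).length = (cards.filter p).length := by
    intro p
    rw [filter_sorted_rev, PySem.List.length_sorted]
  cases htr : PySem.List.sorted
      ((cards.foldl (fun d card => d.modify (cardRankValue card) [] (fun l => l ++ [card])) PySem.Dict.empty).items.filterMap
        (fun p => if 3 ≤ p.2.length then some p.1 else none)) (fun r => r) true with
  | nil =>
    have hTK := (PySem.List.sorted_eq_nil_iff _ _ _).mp htr
    rw [scanRuns_none (PySem.List.sorted cards cardRankValue true).length _ [] le_rfl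
      (PySem.List.sorted_pairwise_rev cards cardRankValue) ?_]
    intro b hb
    by_contra hge
    have hge' : 3 ≤ (cards.filter (fun d => cardRankValue d == cardRankValue b)).length := by
      rw [← hcntS]; omega
    have hbc : b ∈ cards := (PySem.List.mem_sorted _ _ _ _).mp hb
    have : cardRankValue b ∈ ((cards.foldl (fun d card => d.modify (cardRankValue card) [] (fun l => l ++ [card])) PySem.Dict.empty).items.filterMap
        (fun p => if 3 ≤ p.2.length then some p.1 else none)) :=
      (mem_tripRanks cards (cardRankValue b)).mpr ⟨List.mem_map_of_mem hbc, hge'⟩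
    rw [hTK] at this
    exact absurd this (List.not_mem_nil)
  | cons t ts =>
    have htmem : t ∈ ((cards.foldl (fun d card => d.modify (cardRankValue card) [] (fun l => l ++ [card])) PySem.Dict.empty).items.filterMap
        (fun p => if 3 ≤ p.2.length then some p.1 else none)) := by
      rw [← PySem.List.mem_sorted _ (fun r : Int => r) true, htr]
      exact List.mem_cons_self ..
    obtain ⟨-, hcnt3⟩ := (mem_tripRanks cards t).mp htmem
    have hmax := PySem.List.key_head_sorted_rev_ge _ (fun r : Int => r) htr
    rw [scanRuns_found (PySem.List.sorted cards cardRankValue true).length _ [] t le_rfl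
      (PySem.List.sorted_pairwise_rev cards cardRankValue)
      (by rw [hcntS]; exact hcnt3)
      ?_]
    · -- the five components agree
      dsimp only
      have hfe : (PySem.List.sorted cards cardRankValue true).filter (fun d => cardRankValue d == t)
          = cards.filter (fun c => cardRankValue c == t) := by
        rw [filter_sorted_rev]
        apply PySem.List.sorted_rev_eq_self_of_pairwise
        apply List.pairwise_of_forall_mem_list
        intro a ha b hb
        have ha' : cardRankValue a = t := by simpa using (List.mem_filter.mp ha).2
        have hb' : cardRankValue b = t := by simpa using (List.mem_filter.mp hb).2
        rw [ha', hb']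
      have hk : (PySem.List.sorted cards cardRankValue true).filter (fun d => cardRankValue d != t)
          = PySem.List.sorted (cards.filter (fun card => cardRankValue card != t)) cardRankValue true :=
        filter_sorted_rev _ _ _
      rw [groupDict_getD cards t, hfe, hk]
      rw [show (3 : Int) = ((3 : Nat) : Int) by norm_num, PySem.List.slice_to_natCast]
      simp only [List.nil_append, PySem.List.pyGetD_ofNat']
      rw [getD_take3 _ _ 0 (by omega), getD_take3 _ _ 1 (by omega), getD_take3 _ _ 2 (by omega)]
    · -- maximality of t among ranks with three cards
      intro b hb hge
      have hbc : b ∈ cards := (PySem.List.mem_sorted _ _ _ _).mp hb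
      have hge' : 3 ≤ (cards.filter (fun d => cardRankValue d == cardRankValue b)).length := by
        rw [← hcntS]; exact hge
      exact hmax _ ((mem_tripRanks cards (cardRankValue b)).mpr ⟨List.mem_map_of_mem hbc, hge'⟩)
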